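-- pv_equiv track=rewrite | github.com/iwansal64/Python_5 | ThreeDimensionTransformation/three_dimensional_rotation_2.py | half_rotate_z
-- ===== SOURCE A (Python) =====
-- import copy
--
-- def half_rotate_z(arr:list[list[list]], reverse:bool=False):
--     retval = copy.deepcopy(arr)
--
--     error_value = []
--     temp = ["", ""]
--     temp_index = 0
--     for i in range(len(arr)):
--         if i != 0:
--             continue
--
--         for j in range(len(arr[0])):
--             for k in range(len(arr[0][0])):
--                 if k == len(arr[0][0])-2:
--                     error_value.append(arr[i][j][k])
--
--                 temp[temp_index] = arr[i][j][k]
--                 retval[i][j][k] = temp[not temp_index]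
--                 temp_index = not temp_index
--
--     for i in range(len(arr)):
--         if i != len(arr)-1:
--             continue
--
--         for j in range(len(arr[0])):
--             for k in range(len(arr[0][0])-1, -1, -1):
--                 if k == 1:
--                     error_value.append(arr[i][j][k])
--
--                 temp[temp_index] = arr[i][j][k]
--                 retval[i][j][k] = temp[not temp_index]
--                 temp_index = not temp_index
--
--     for j in range(len(arr[0])):
--         for k in range(len(arr[0][0])-1, -1, -1):
--             temp[temp_index] = arr[k][j][0]
--             retval[k][j][0] = temp[not temp_index]
--             temp_index = not temp_index
--
--     for j in range(len(arr[0])):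
--         for k in range(len(arr[0][0])):
--             temp[temp_index] = arr[k][j][len(arr)-1]
--             retval[k][j][len(arr)-1] = temp[not temp_index]
--             temp_index = not temp_index
--
--     for j in range(len(arr[0])):
--         retval[0][j][len(arr[0][0])-1] = error_value[j]
--         retval[len(arr)-1][j][0] = error_value[j+len(arr[0])]
--
--     return retval
-- ===== SOURCE B (Python) =====
-- import copy
--
-- def half_rotate_z(arr, reverse=False):
--     # One shift register over the ordered coordinate sequence the four loops visit,
--     # then the two closed-form error-value fixups per row.
--     retval = copy.deepcopy(arr)
--     if not arr or not arr[0]: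
--         return retval
--     rows, cols, last = len(arr[0]), len(arr[0][0]), len(arr) - 1
--     coords = []
--     for j in range(rows):
--         coords += [(0, j, k) for k in range(cols)]
--     for j in range(rows):
--         coords += [(last, j, k) for k in range(cols - 1, -1, -1)]
--     for j in range(rows):
--         coords += [(k, j, 0) for k in range(cols - 1, -1, -1)]
--     for j in range(rows):
--         coords += [(k, j, last) for k in range(cols)]
--     vals = [arr[i][j][k] for (i, j, k) in coords]
--     shifted = [""] + vals[:-1]
--     for (i, j, k), v in zip(coords, shifted):
--         retval[i][j][k] = v
--     for j in range(rows):
--         retval[0][j][cols - 1] = arr[0][j][cols - 2]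
--         retval[last][j][0] = arr[last][j][1]
--     return retval
-- ===== Notes on version B (the rewrite author's own statement) =====
-- stated objective: alternative
-- what changed: A's four interleaved stateful loops with a two-slot temp shift buffer and on-the-fly error_value collection are replaced by building the visited coordinate list once, bulk-assigning each coordinate its predecessor's original value (empty-string seed first), and writing the two error-value fixups per row in closed form from the original array.
import Mathlib
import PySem

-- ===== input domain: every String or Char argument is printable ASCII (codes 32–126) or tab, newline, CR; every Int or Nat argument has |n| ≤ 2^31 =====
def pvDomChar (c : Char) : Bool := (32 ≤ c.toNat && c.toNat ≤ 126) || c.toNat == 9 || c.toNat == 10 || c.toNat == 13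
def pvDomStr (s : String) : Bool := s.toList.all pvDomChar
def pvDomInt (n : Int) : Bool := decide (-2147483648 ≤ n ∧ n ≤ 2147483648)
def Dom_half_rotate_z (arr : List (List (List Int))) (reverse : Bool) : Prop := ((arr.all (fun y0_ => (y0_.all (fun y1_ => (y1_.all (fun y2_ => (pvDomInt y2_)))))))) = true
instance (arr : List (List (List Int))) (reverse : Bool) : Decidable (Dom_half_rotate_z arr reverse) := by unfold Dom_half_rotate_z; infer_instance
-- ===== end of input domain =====

-- B replaces A's four interleaved two-slot temp shift loops by one explicit coordinate list,
-- a shifted bulk assignment, and closed-form per-row fixups (objective: alternative decomposition).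

-- ===== PORT A =====
-- shared 3d indexing helpers: arr[i][j][k] and retval[i][j][k] = v (Pre_ keeps all indices in range)
def aget (arr : List (List (List Int))) (i j k : Nat) : Int := ((arr.getD i []).getD j []).getD k 0
def set3 (r : List (List (List Int))) (i j k : Nat) (v : Int) : List (List (List Int)) :=
  r.set i ((r.getD i []).set j (((r.getD i []).getD j []).set k v))
def rowsOf (arr : List (List (List Int))) : Nat := (arr.getD 0 []).length
def colsOf (arr : List (List (List Int))) : Nat := ((arr.getD 0 []).getD 0 []).length

-- loop state of A: (retval, error_value, temp0, temp1, temp_index).  temp slots are Option Int: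
-- none is Python's "" seed; its single write is erased to 0, and within Pre_ that cell ((0,0,0))
-- is always written again by the third loop, so the erased value never reaches the result.
abbrev StA := List (List (List Int)) × List Int × Option Int × Option Int × Bool

-- the shared body of A's four shift loops at coordinate c: error_value recording when rec holds,
-- temp[temp_index] = arr[c]; retval[c] = temp[not temp_index]; temp_index = not temp_index
def stepA (arr : List (List (List Int))) (rec : Nat × Nat × Nat → Bool) (s : StA)
    (c : Nat × Nat × Nat) : StA :=
  match s with
  | (r, ev, t0, t1, idx) =>
    let ev' := if rec c then ev ++ [aget arr c.1 c.2.1 c.2.2] else ev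
    let t0' := if idx = false then some (aget arr c.1 c.2.1 c.2.2) else t0
    let t1' := if idx = true then some (aget arr c.1 c.2.1 c.2.2) else t1
    (set3 r c.1 c.2.1 c.2.2 ((if idx then t0' else t1').getD 0), ev', t0', t1', !idx)

-- for i in range(len(arr)): if i != 0: continue; for j …: for k in range(cols): …  (records at k == cols-2)
def loopA1 (arr : List (List (List Int))) (s : StA) : StA :=
  (List.range arr.length).foldl (fun s i =>
    if i ≠ 0 then s else
    (List.range (rowsOf arr)).foldl (fun s j =>
      (List.range (colsOf arr)).foldl (fun s k =>
        stepA arr (fun c => decide ((c.2.2 : Int) = (colsOf arr : Int) - 2)) s (i, j, k)) s) s) s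

-- for i in range(len(arr)): if i != len(arr)-1: continue; for j …: for k in range(cols-1,-1,-1): …  (records at k == 1)
def loopA2 (arr : List (List (List Int))) (s : StA) : StA :=
  (List.range arr.length).foldl (fun s (i : Nat) =>
    if (i : Int) ≠ (arr.length : Int) - 1 then s else
    (List.range (rowsOf arr)).foldl (fun s j =>
      ((List.range (colsOf arr)).reverse).foldl (fun s k =>
        stepA arr (fun c => decide ((c.2.2 : Int) = 1)) s (i, j, k)) s) s) s

-- for j …: for k in range(cols-1,-1,-1): … arr[k][j][0] …
def loopA3 (arr : List (List (List Int))) (s : StA) : StA :=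
  (List.range (rowsOf arr)).foldl (fun s j =>
    ((List.range (colsOf arr)).reverse).foldl (fun s k =>
      stepA arr (fun _ => false) s (k, j, 0)) s) s

-- for j …: for k in range(cols): … arr[k][j][len(arr)-1] …
def loopA4 (arr : List (List (List Int))) (s : StA) : StA :=
  (List.range (rowsOf arr)).foldl (fun s j =>
    (List.range (colsOf arr)).foldl (fun s k =>
      stepA arr (fun _ => false) s (k, j, arr.length - 1)) s) s

def half_rotate_z (arr : List (List (List Int))) (reverse : Bool) : List (List (List Int)) :=
  let s4 := loopA4 arr (loopA3 arr (loopA2 arr (loopA1 arr (arr, [], none, none, false))))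
  -- final fixups: retval[0][j][cols-1] = error_value[j]; retval[len(arr)-1][j][0] = error_value[j+rows]
  (List.range (rowsOf arr)).foldl (fun r j =>
    set3 (set3 r 0 j (colsOf arr - 1) (s4.2.1.getD j 0))
      (arr.length - 1) j 0 (s4.2.1.getD (j + rowsOf arr) 0)) s4.1

-- ===== PORT B =====
-- the coordinate sequence the four loops visit, in visiting order
def bCoords (arr : List (List (List Int))) : List (Nat × Nat × Nat) :=
  ((List.range (rowsOf arr)).flatMap (fun j => (List.range (colsOf arr)).map (fun k => (0, j, k)))) ++
  ((List.range (rowsOf arr)).flatMap (fun j => ((List.range (colsOf arr)).reverse).map (fun k => (arr.length - 1, j, k)))) ++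
  ((List.range (rowsOf arr)).flatMap (fun j => ((List.range (colsOf arr)).reverse).map (fun k => (k, j, 0)))) ++
  ((List.range (rowsOf arr)).flatMap (fun j => (List.range (colsOf arr)).map (fun k => (k, j, arr.length - 1))))

def half_rotate_z_alt (arr : List (List (List Int))) (reverse : Bool) : List (List (List Int)) :=
  if arr = [] ∨ arr.getD 0 [] = [] then arr else
  let coords := bCoords arr
  let vals := coords.map (fun c => aget arr c.1 c.2.1 c.2.2)
  -- shifted = [""] + vals[:-1]; the "" seed is none, erased to 0 at its single (re-overwritten) write
  let shifted : List (Option Int) := none :: (vals.map some).dropLast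
  let r0 := (coords.zip shifted).foldl (fun r cv => set3 r cv.1.1 cv.1.2.1 cv.1.2.2 (cv.2.getD 0)) arr
  (List.range (rowsOf arr)).foldl (fun r j =>
    set3 (set3 r 0 j (colsOf arr - 1) (aget arr 0 j (colsOf arr - 2)))
      (arr.length - 1) j 0 (aget arr (arr.length - 1) j 1)) r0

-- ===== PRECONDITION & SPEC =====
-- Pre_ is exactly the inputs where the Python A returns (no IndexError): a nonempty arr whose
-- first layer is empty, or whose shapes keep every access of the four loops and the final
-- error_value fixups in range (which forces cols ≥ 2 and cols ≤ len(arr)).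
def Pre_half_rotate_z (arr : List (List (List Int))) (reverse : Bool) : Prop :=
  arr ≠ [] ∧
  (rowsOf arr = 0 ∨
    (2 ≤ colsOf arr ∧ colsOf arr ≤ arr.length ∧
     rowsOf arr ≤ (arr.getD (arr.length - 1) []).length ∧
     (∀ j < rowsOf arr, colsOf arr ≤ ((arr.getD (arr.length - 1) []).getD j []).length) ∧
     (∀ k < colsOf arr,
        rowsOf arr ≤ (arr.getD k []).length ∧
        ∀ j < rowsOf arr, arr.length ≤ ((arr.getD k []).getD j []).length)))
instance (arr : List (List (List Int))) (reverse : Bool) : Decidable (Pre_half_rotate_z arr reverse) := by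
  unfold Pre_half_rotate_z; infer_instance

def pvWitness_half_rotate_z : List (List (List Int)) × Bool :=
  ([[[1, 2], [3, 4]], [[5, 6], [7, 8]]], false)

def Spec_half_rotate_z (arr : List (List (List Int))) (reverse : Bool) (out : List (List (List Int))) : Prop := out = half_rotate_z_alt arr reverse
instance (arr : List (List (List Int))) (reverse : Bool) (out : List (List (List Int))) : Decidable (Spec_half_rotate_z arr reverse out) := by unfold Spec_half_rotate_z; infer_instance

-- ===== CLAIM (what is proved, stated in full; the proofs are below) =====
def Claim_equal_half_rotate_z : Prop := ∀ (arr : List (List (List Int))) (reverse : Bool), Dom_half_rotate_z arr reverse → Pre_half_rotate_z arr reverse → Spec_half_rotate_z arr reverse (half_rotate_z arr reverse)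

-- ===== LEMMAS AND PROOFS =====

-- the pending value of A's temp machinery: the slot the next write will read, temp[not temp_index]
def pend (s : StA) : Option Int := if s.2.2.2.2 then s.2.2.1 else s.2.2.2.1

-- the shift register: write the pending value at each coordinate, the read value becomes pending
def segW (arr : List (List (List Int))) :
    List (List (List Int)) → Option Int → List (Nat × Nat × Nat) →
      List (List (List Int)) × Option Int
  | r, p, [] => (r, p)
  | r, p, c :: cs =>
      segW arr (set3 r c.1 c.2.1 c.2.2 (p.getD 0)) (some (aget arr c.1 c.2.1 c.2.2)) cs

-- the error values a loop records
def evsOf (arr : List (List (List Int))) (rec : Nat × Nat × Nat → Bool)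
    (cs : List (Nat × Nat × Nat)) : List Int :=
  cs.filterMap (fun c => if rec c then some (aget arr c.1 c.2.1 c.2.2) else none)

theorem stepA_fst (arr : List (List (List Int))) (rec : Nat × Nat × Nat → Bool) (s : StA)
    (c : Nat × Nat × Nat) :
    (stepA arr rec s c).1 = set3 s.1 c.1 c.2.1 c.2.2 ((pend s).getD 0) := by
  obtain ⟨r, ev, t0, t1, idx⟩ := s
  cases idx <;> simp [stepA, pend]

theorem stepA_ev (arr : List (List (List Int))) (rec : Nat × Nat × Nat → Bool) (s : StA)
    (c : Nat × Nat × Nat) :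
    (stepA arr rec s c).2.1 = if rec c then s.2.1 ++ [aget arr c.1 c.2.1 c.2.2] else s.2.1 := by
  obtain ⟨r, ev, t0, t1, idx⟩ := s
  cases idx <;> simp [stepA, pend]

theorem stepA_pend (arr : List (List (List Int))) (rec : Nat × Nat × Nat → Bool) (s : StA)
    (c : Nat × Nat × Nat) :
    pend (stepA arr rec s c) = some (aget arr c.1 c.2.1 c.2.2) := by
  obtain ⟨r, ev, t0, t1, idx⟩ := s
  cases idx <;> simp [stepA, pend]

-- the fold of stepA over a coordinate list is the shift register plus the recorded error values
theorem foldA_char (arr : List (List (List Int))) (rec : Nat × Nat × Nat → Bool)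
    (cs : List (Nat × Nat × Nat)) : ∀ (s : StA),
      (cs.foldl (stepA arr rec) s).1 = (segW arr s.1 (pend s) cs).1 ∧
      (cs.foldl (stepA arr rec) s).2.1 = s.2.1 ++ evsOf arr rec cs ∧
      pend (cs.foldl (stepA arr rec) s) = (segW arr s.1 (pend s) cs).2 := by
  induction cs with
  | nil => intro s; simp [segW, evsOf]
  | cons c cs ih =>
    intro s
    obtain ⟨h1, h2, h3⟩ := ih (stepA arr rec s c)
    refine ⟨?_, ?_, ?_⟩
    · rw [List.foldl_cons, h1, stepA_fst, stepA_pend, segW]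
    · rw [List.foldl_cons, h2, stepA_ev]
      simp only [evsOf, List.filterMap_cons]
      by_cases h : rec c <;> simp [h]
    · rw [List.foldl_cons, h3, stepA_fst, stepA_pend, segW]

theorem segW_append (arr : List (List (List Int))) (cs : List (Nat × Nat × Nat)) :
    ∀ (ds : List (Nat × Nat × Nat)) (r : List (List (List Int))) (p : Option Int),
      segW arr r p (cs ++ ds) = segW arr (segW arr r p cs).1 (segW arr r p cs).2 ds := by
  induction cs with
  | nil => intro ds r p; rfl
  | cons c cs ih => intro ds r p; simpa [segW] using ih ds _ _

theorem foldl_flatMap' {α β γ : Type} (l : List α) (g : α → List β) (f : γ → β → γ) (s : γ) :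
    (l.flatMap g).foldl f s = l.foldl (fun s a => (g a).foldl f s) s := by
  induction l generalizing s with
  | nil => rfl
  | cons a l ih => simp only [List.flatMap_cons, List.foldl_append, List.foldl_cons, ih]

theorem foldl_guard_zero {σ : Type} (n : Nat) (hn : 1 ≤ n) (F : Nat → σ → σ) (s : σ) :
    (List.range n).foldl (fun s i => if i ≠ 0 then s else F i s) s = F 0 s := by
  obtain ⟨m, rfl⟩ : ∃ m, n = m + 1 := ⟨n - 1, by omega⟩
  rw [List.range_succ_eq_map, List.foldl_cons, List.foldl_map,
    PySem.List.foldl_congr_mem (List.range m) _ (fun acc _ => acc) _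
      (by intro acc x hx; simp),
    PySem.List.foldl_ignore]
  simp

theorem foldl_guard_last {σ : Type} (n : Nat) (hn : 1 ≤ n) (F : Nat → σ → σ) (s : σ) :
    (List.range n).foldl (fun s (i : Nat) => if (i : Int) ≠ (n : Int) - 1 then s else F i s) s
      = F (n - 1) s := by
  obtain ⟨m, rfl⟩ : ∃ m, n = m + 1 := ⟨n - 1, by omega⟩
  rw [List.range_succ, List.foldl_append,
    PySem.List.foldl_congr_mem (List.range m) _ (fun acc _ => acc) _
      (by intro acc x hx
          rw [List.mem_range] at hx
          have hne : (x : Int) ≠ (((m + 1 : Nat) : Int)) - 1 := by push_cast; omega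
          rw [if_pos hne]),
    PySem.List.foldl_ignore]
  have he : ¬ ((m : Int) ≠ (((m + 1 : Nat) : Int)) - 1) := by push_cast; omega
  have hm : (m + 1) - 1 = m := by omega
  simp only [List.foldl_cons, List.foldl_nil, hm]
  simp [he]

theorem filterMap_range_hit (n c : Nat) (hc : c < n) (g : Nat → Int) :
    (List.range n).filterMap (fun k => if k = c then some (g k) else none) = [g c] := by
  induction n with
  | zero => omega
  | succ m ih =>
    rw [List.range_succ, List.filterMap_append]
    by_cases h : c = m
    · subst h
      have h0 : (List.range c).filterMap (fun k => if k = c then some (g k) else none) = [] := by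
        rw [List.filterMap_eq_nil_iff]
        intro a ha
        rw [List.mem_range] at ha
        simp [Nat.ne_of_lt ha]
      simp [h0]
    · have hc' : c < m := by omega
      rw [ih hc']
      have hnil : (List.filterMap (fun k => if k = c then some (g k) else none) [m]) = [] := by
        simp [show ¬ m = c by omega]
      rw [hnil, List.append_nil]

theorem flatMap_singleton_eq_map {α β : Type} (l : List α) (f : α → β) :
    (l.flatMap (fun x => [f x])) = l.map f := by
  induction l with
  | nil => rfl
  | cons a l ih => simp [List.flatMap_cons, ih]

-- the four coordinate segments
def csA1 (arr : List (List (List Int))) : List (Nat × Nat × Nat) :=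
  (List.range (rowsOf arr)).flatMap (fun j => (List.range (colsOf arr)).map (fun k => ((0 : Nat), j, k)))
def csA2 (arr : List (List (List Int))) : List (Nat × Nat × Nat) :=
  (List.range (rowsOf arr)).flatMap (fun j => ((List.range (colsOf arr)).reverse).map (fun k => (arr.length - 1, j, k)))
def csA3 (arr : List (List (List Int))) : List (Nat × Nat × Nat) :=
  (List.range (rowsOf arr)).flatMap (fun j => ((List.range (colsOf arr)).reverse).map (fun k => (k, j, (0 : Nat))))
def csA4 (arr : List (List (List Int))) : List (Nat × Nat × Nat) :=
  (List.range (rowsOf arr)).flatMap (fun j => (List.range (colsOf arr)).map (fun k => (k, j, arr.length - 1)))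

theorem bCoords_eq (arr : List (List (List Int))) :
    bCoords arr = csA1 arr ++ csA2 arr ++ csA3 arr ++ csA4 arr := rfl

theorem loopA1_eq (arr : List (List (List Int))) (h : 1 ≤ arr.length) (s : StA) :
    loopA1 arr s = (csA1 arr).foldl
      (stepA arr (fun c => decide ((c.2.2 : Int) = (colsOf arr : Int) - 2))) s := by
  rw [loopA1, foldl_guard_zero arr.length h
    (fun i s => (List.range (rowsOf arr)).foldl (fun s j =>
      (List.range (colsOf arr)).foldl (fun s k =>
        stepA arr (fun c => decide ((c.2.2 : Int) = (colsOf arr : Int) - 2)) s (i, j, k)) s) s)]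
  rw [csA1, foldl_flatMap']
  simp only [List.foldl_map]

theorem loopA2_eq (arr : List (List (List Int))) (h : 1 ≤ arr.length) (s : StA) :
    loopA2 arr s = (csA2 arr).foldl
      (stepA arr (fun c => decide ((c.2.2 : Int) = 1))) s := by
  rw [loopA2, foldl_guard_last arr.length h
    (fun i s => (List.range (rowsOf arr)).foldl (fun s j =>
      ((List.range (colsOf arr)).reverse).foldl (fun s k =>
        stepA arr (fun c => decide ((c.2.2 : Int) = 1)) s (i, j, k)) s) s)]
  rw [csA2, foldl_flatMap']
  simp only [List.foldl_map]

theorem loopA3_eq (arr : List (List (List Int))) (s : StA) :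
    loopA3 arr s = (csA3 arr).foldl (stepA arr (fun _ => false)) s := by
  rw [loopA3, csA3, foldl_flatMap']
  simp only [List.foldl_map]

theorem loopA4_eq (arr : List (List (List Int))) (s : StA) :
    loopA4 arr s = (csA4 arr).foldl (stepA arr (fun _ => false)) s := by
  rw [loopA4, csA4, foldl_flatMap']
  simp only [List.foldl_map]

theorem evs_false (arr : List (List (List Int))) (cs : List (Nat × Nat × Nat)) :
    evsOf arr (fun _ => false) cs = [] := by
  simp [evsOf]

theorem evs1_eq (arr : List (List (List Int))) (h2 : 2 ≤ colsOf arr) :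
    evsOf arr (fun c => decide ((c.2.2 : Int) = (colsOf arr : Int) - 2)) (csA1 arr)
      = (List.range (rowsOf arr)).map (fun j => aget arr 0 j (colsOf arr - 2)) := by
  rw [evsOf, csA1, List.filterMap_flatMap]
  have hj : ∀ j : Nat,
      ((List.range (colsOf arr)).map (fun k => ((0 : Nat), j, k))).filterMap
        (fun c => if (fun c => decide ((c.2.2 : Int) = (colsOf arr : Int) - 2)) c
                  then some (aget arr c.1 c.2.1 c.2.2) else none)
        = [aget arr 0 j (colsOf arr - 2)] := by
    intro j
    rw [List.filterMap_map]
    rw [List.filterMap_congr (g := fun k => if k = colsOf arr - 2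
        then some (aget arr 0 j k) else none)
      (by intro k hk
          simp only [Function.comp]
          by_cases h : k = colsOf arr - 2
          · have hcast : ((k : Int) = (colsOf arr : Int) - 2) := by omega
            simp [h, hcast] <;> omega
          · have hcast : ¬ ((k : Int) = (colsOf arr : Int) - 2) := by omega
            simp [h, hcast])]
    exact filterMap_range_hit _ _ (by omega) _
  rw [List.flatMap_congr (fun j _ => hj j), flatMap_singleton_eq_map]

theorem evs2_eq (arr : List (List (List Int))) (h2 : 2 ≤ colsOf arr) :
    evsOf arr (fun c => decide ((c.2.2 : Int) = 1)) (csA2 arr)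
      = (List.range (rowsOf arr)).map (fun j => aget arr (arr.length - 1) j 1) := by
  rw [evsOf, csA2, List.filterMap_flatMap]
  have hj : ∀ j : Nat,
      (((List.range (colsOf arr)).reverse).map (fun k => (arr.length - 1, j, k))).filterMap
        (fun c => if (fun c => decide ((c.2.2 : Int) = 1)) c
                  then some (aget arr c.1 c.2.1 c.2.2) else none)
        = [aget arr (arr.length - 1) j 1] := by
    intro j
    rw [List.filterMap_map, List.filterMap_reverse]
    rw [List.filterMap_congr (g := fun k => if k = 1
        then some (aget arr (arr.length - 1) j k) else none)
      (by intro k hk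
          simp only [Function.comp]
          by_cases h : k = 1
          · have hcast : ((k : Int) = 1) := by omega
            simp [h, hcast]
          · have hcast : ¬ ((k : Int) = 1) := by omega
            simp [h, hcast])]
    rw [filterMap_range_hit _ _ (by omega) _, List.reverse_singleton]
  rw [List.flatMap_congr (fun j _ => hj j), flatMap_singleton_eq_map]

theorem zipfold_eq_segW (arr : List (List (List Int))) (cs : List (Nat × Nat × Nat)) :
    ∀ (r : List (List (List Int))) (p : Option Int),
      ((cs.zip (p :: ((cs.map (fun c => aget arr c.1 c.2.1 c.2.2)).map some).dropLast)).foldl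
        (fun r cv => set3 r cv.1.1 cv.1.2.1 cv.1.2.2 (cv.2.getD 0)) r) = (segW arr r p cs).1 := by
  induction cs with
  | nil => intro r p; rfl
  | cons c cs ih =>
    intro r p
    cases cs with
    | nil => simp [segW]
    | cons d e =>
      rw [show ((((c :: d :: e).map (fun c => aget arr c.1 c.2.1 c.2.2)).map some).dropLast)
          = some (aget arr c.1 c.2.1 c.2.2) ::
            ((((d :: e).map (fun c => aget arr c.1 c.2.1 c.2.2)).map some).dropLast) from by
        simp [List.dropLast_cons₂]]
      rw [List.zip_cons_cons, List.foldl_cons, ih]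
      rfl

theorem getD_append_lt {α : Type} (l l' : List α) (i : Nat) (d : α) (h : i < l.length) :
    (l ++ l').getD i d = l.getD i d := by
  simp [List.getD, List.getElem?_append_left h]

theorem getD_append_add {α : Type} (l l' : List α) (i : Nat) (d : α) :
    (l ++ l').getD (i + l.length) d = l'.getD i d := by
  simp [List.getD, List.getElem?_append_right (by omega : l.length ≤ i + l.length)]

theorem getD_map_range (n j : Nat) (hj : j < n) (h : Nat → Int) :
    ((List.range n).map h).getD j 0 = h j := by
  simp [List.getD, List.getElem?_map, List.getElem?_range hj]

theorem loopAi_id (arr : List (List (List Int))) (h0 : rowsOf arr = 0) :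
    (∀ s : StA, loopA1 arr s = s) ∧ (∀ s : StA, loopA2 arr s = s) ∧
    (∀ s : StA, loopA3 arr s = s) ∧ (∀ s : StA, loopA4 arr s = s) := by
  refine ⟨?_, ?_, ?_, ?_⟩ <;> intro s
  · rw [loopA1, PySem.List.foldl_congr_mem _ _ (fun acc _ => acc) _
      (by intro acc x hx; simp [h0]), PySem.List.foldl_ignore]
  · rw [loopA2, PySem.List.foldl_congr_mem _ _ (fun acc _ => acc) _
      (by intro acc x hx; simp [h0]), PySem.List.foldl_ignore]
  · rw [loopA3, h0]; rfl
  · rw [loopA4, h0]; rfl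

theorem main_eq (arr : List (List (List Int))) (reverse : Bool)
    (hpre : Pre_half_rotate_z arr reverse) :
    half_rotate_z arr reverse = half_rotate_z_alt arr reverse := by
  obtain ⟨hne, hcase⟩ := hpre
  have hlen : 1 ≤ arr.length := by
    cases arr with
    | nil => exact absurd rfl hne
    | cons a t => simp
  by_cases hr0 : rowsOf arr = 0
  · -- empty first layer: both sides return arr unchanged
    obtain ⟨l1, l2, l3, l4⟩ := loopAi_id arr hr0
    have hA : half_rotate_z arr reverse = arr := by
      simp only [half_rotate_z, l1, l2, l3, l4, hr0, List.range_zero, List.foldl_nil]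
    have hB : half_rotate_z_alt arr reverse = arr := by
      rw [half_rotate_z_alt, if_pos]
      right
      rw [← List.length_eq_zero_iff]
      exact hr0
    rw [hA, hB]
  · rcases hcase with h0 | ⟨h2, _hrest⟩
    · exact absurd h0 hr0
    -- main case: rows ≥ 1, cols ≥ 2
    have hgetne : arr.getD 0 [] ≠ [] := by
      intro h
      apply hr0
      rw [rowsOf, h]
      rfl
    set s0 : StA := (arr, ([] : List Int), (none : Option Int), (none : Option Int), false) with hs0
    obtain ⟨a1, e1, p1⟩ :=
      foldA_char arr (fun c => decide ((c.2.2 : Int) = (colsOf arr : Int) - 2)) (csA1 arr) s0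
    set s1 := (csA1 arr).foldl
      (stepA arr (fun c => decide ((c.2.2 : Int) = (colsOf arr : Int) - 2))) s0 with hs1
    obtain ⟨a2, e2, p2⟩ := foldA_char arr (fun c => decide ((c.2.2 : Int) = 1)) (csA2 arr) s1
    set s2 := (csA2 arr).foldl (stepA arr (fun c => decide ((c.2.2 : Int) = 1))) s1 with hs2
    obtain ⟨a3, e3, p3⟩ := foldA_char arr (fun _ => false) (csA3 arr) s2
    set s3 := (csA3 arr).foldl (stepA arr (fun _ => false)) s2 with hs3
    obtain ⟨a4, e4, p4⟩ := foldA_char arr (fun _ => false) (csA4 arr) s3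
    set s4 := (csA4 arr).foldl (stepA arr (fun _ => false)) s3 with hs4
    -- chain the characterisations through the four segments
    have A1 : s1.1 = (segW arr arr none (csA1 arr)).1 := by rw [a1]; rfl
    have P1 : pend s1 = (segW arr arr none (csA1 arr)).2 := by rw [p1]; rfl
    have A2 : s2.1 = (segW arr arr none (csA1 arr ++ csA2 arr)).1 := by
      rw [a2, A1, P1, ← segW_append]
    have P2 : pend s2 = (segW arr arr none (csA1 arr ++ csA2 arr)).2 := by
      rw [p2, A1, P1, ← segW_append]
    have A3 : s3.1 = (segW arr arr none (csA1 arr ++ csA2 arr ++ csA3 arr)).1 := by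
      rw [a3, A2, P2, ← segW_append]
    have P3 : pend s3 = (segW arr arr none (csA1 arr ++ csA2 arr ++ csA3 arr)).2 := by
      rw [p3, A2, P2, ← segW_append]
    have A4 : s4.1 = (segW arr arr none (csA1 arr ++ csA2 arr ++ csA3 arr ++ csA4 arr)).1 := by
      rw [a4, A3, P3, ← segW_append]
    have hev : s4.2.1 =
        (List.range (rowsOf arr)).map (fun j => aget arr 0 j (colsOf arr - 2)) ++
        (List.range (rowsOf arr)).map (fun j => aget arr (arr.length - 1) j 1) := by
      rw [e4, e3, e2, e1, evs_false, evs_false, evs1_eq arr h2, evs2_eq arr h2,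
        show s0.2.1 = ([] : List Int) from rfl]
      simp
    -- unfold both programs
    simp only [half_rotate_z, half_rotate_z_alt]
    rw [if_neg (by push_neg; exact ⟨hne, hgetne⟩)]
    rw [loopA1_eq arr hlen, loopA2_eq arr hlen, loopA3_eq arr, loopA4_eq arr,
      ← hs0, ← hs1, ← hs2, ← hs3, ← hs4]
    rw [bCoords_eq, zipfold_eq_segW, ← A4]
    -- the two fixup folds agree
    apply PySem.List.foldl_congr_mem
    intro acc j hj
    rw [List.mem_range] at hj
    have hg1 : s4.2.1.getD j 0 = aget arr 0 j (colsOf arr - 2) := by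
      rw [hev, getD_append_lt _ _ _ _ (by simp [hj]), getD_map_range _ _ hj]
    have hg2 : s4.2.1.getD (j + rowsOf arr) 0 = aget arr (arr.length - 1) j 1 := by
      rw [hev,
        show j + rowsOf arr = j + ((List.range (rowsOf arr)).map
          (fun j => aget arr 0 j (colsOf arr - 2))).length from by simp,
        getD_append_add, getD_map_range _ _ hj]
    rw [hg1, hg2]

-- ===== VERDICT (by name: the statement is the Claim_ definition above) =====
theorem half_rotate_z_spec : Claim_equal_half_rotate_z := by
  intro arr reverse _hdom hpre
  unfold Spec_half_rotate_z
  exact main_eq arr reverse hpre
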